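-- pv_equiv track=rewrite | github.com/LeechCSE/Asyncio-Proxy-Herd | code/server.py | parse_location
-- ===== SOURCE A (Python) =====
-- def parse_location(location):
--     lat_str, lng_str = '', ''
--     split_flag, first_flag = True, True
--     for char in location:
--         if ((not first_flag) and (char == '+' or char == '-')):
--             split_flag = False
--         if split_flag: lat_str += char
--         else: lng_str += char
--         if first_flag: first_flag = False
--     return lat_str, lng_str
-- ===== SOURCE B (Python) =====
-- def parse_location(location):
--     i = next((k for k in range(1, len(location)) if location[k] in '+-'), len(location))
--     return location[:i], location[i:]
-- ===== Notes on version B (the rewrite author's own statement) =====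
-- stated objective: simpler
-- what changed: Replaces the per-character accumulation into two strings with two flag booleans by finding the first sign position at index >= 1 and returning the two slices around it.
import Mathlib
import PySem

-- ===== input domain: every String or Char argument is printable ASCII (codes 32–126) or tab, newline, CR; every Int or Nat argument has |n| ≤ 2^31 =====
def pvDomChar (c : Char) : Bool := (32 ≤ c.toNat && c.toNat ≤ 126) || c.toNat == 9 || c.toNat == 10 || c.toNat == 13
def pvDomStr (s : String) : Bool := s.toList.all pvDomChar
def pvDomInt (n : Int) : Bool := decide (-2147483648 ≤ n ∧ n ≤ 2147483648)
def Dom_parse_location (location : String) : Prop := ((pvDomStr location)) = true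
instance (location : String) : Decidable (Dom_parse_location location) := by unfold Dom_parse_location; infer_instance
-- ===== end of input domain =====

-- B replaces A's per-character accumulation with two flag booleans by a scan
-- for the first sign at index >= 1 followed by two slices (objective: simpler).

-- ===== PORT A =====
-- the for-loop of A over the characters, carrying (lat_str, lng_str, split_flag, first_flag)
def pvLoopA : List Char → List Char → List Char → Bool → Bool → List Char × List Char
  | [], lat, lng, _, _ => (lat, lng)
  | c :: rest, lat, lng, split, first =>
    let split' := if (!first) && (c == '+' || c == '-') then false else split
    if split' then pvLoopA rest (lat ++ [c]) lng split' false
    else pvLoopA rest lat (lng ++ [c]) split' false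

def parse_location (location : String) : String × String :=
  let p := pvLoopA location.toList [] [] true true
  (String.mk p.1, String.mk p.2)

-- ===== PORT B =====
-- the generator of B: first offset k in rest (= chars after index 0) holding a sign, else rest.length
def pvFindSplit : List Char → Nat
  | [] => 0
  | c :: rest => if c == '+' || c == '-' then 0 else 1 + pvFindSplit rest

def parse_location_alt (location : String) : String × String :=
  match location.toList with
  | [] => (location, "")
  | c :: rest =>
    let i := 1 + pvFindSplit rest
    (String.mk ((c :: rest).take i), String.mk ((c :: rest).drop i))

-- ===== PRECONDITION & SPEC =====
def Spec_parse_location (location : String) (out : String × String) : Prop := out = parse_location_alt location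
instance (location : String) (out : String × String) : Decidable (Spec_parse_location location out) := by unfold Spec_parse_location; infer_instance

-- ===== CLAIM (what is proved, stated in full; the proofs are below) =====
def Claim_equal_parse_location : Prop := ∀ (location : String), Dom_parse_location location → Spec_parse_location location (parse_location location)

-- ===== LEMMAS AND PROOFS =====

-- once split_flag is False it stays False and everything goes to lng
theorem pvLoopA_false (cs : List Char) : ∀ (lat lng : List Char),
    pvLoopA cs lat lng false false = (lat, lng ++ cs) := by
  induction cs with
  | nil => intro lat lng; simp [pvLoopA]
  | cons c rest ih => intro lat lng; simp [pvLoopA, ih]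

-- with first_flag already False and split_flag True, the loop splits at pvFindSplit
theorem pvLoopA_true (cs : List Char) : ∀ (lat lng : List Char),
    pvLoopA cs lat lng true false =
      (lat ++ cs.take (pvFindSplit cs), lng ++ cs.drop (pvFindSplit cs)) := by
  induction cs with
  | nil => intro lat lng; simp [pvLoopA, pvFindSplit]
  | cons c rest ih =>
    intro lat lng
    by_cases h : (c == '+' || c == '-') = true
    · simp [pvLoopA, pvFindSplit, h, pvLoopA_false]
    · simp [pvLoopA, pvFindSplit, h, ih, List.take_succ_cons, List.drop_succ_cons,
        Nat.add_comm 1 (pvFindSplit rest)]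

-- ===== VERDICT (by name: the statement is the Claim_ definition above) =====
theorem parse_location_spec : Claim_equal_parse_location := by
  intro location _
  unfold Spec_parse_location parse_location parse_location_alt
  cases hl : location.toList with
  | nil =>
    have hloc : location = "" := by simpa using hl
    simp [pvLoopA, hloc]
    rfl
  | cons c rest =>
    -- first iteration: first_flag is True, so split_flag stays True and c goes to lat
    simp [pvLoopA, pvLoopA_true, List.take_succ_cons, List.drop_succ_cons,
      Nat.add_comm 1 (pvFindSplit rest)]
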